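-- pv_equiv track=rewrite | github.com/MariaAlice00/ifpi_programacaoestruturada_2020 | secret_messages/7_calculadora_do_amor.py | montando_placar
-- ===== SOURCE A (Python) =====
-- def montando_placar(nomes):
--     nomes = nomes.split()
--     nomes = nomes[0] + nomes[2]
--
--     placar = 0
--     for letra in nomes:
--         if letra in 'aeiou':
--             placar += 5
--
--         if letra in 'amor':
--             placar += 15
--
--     return placar
-- ===== SOURCE B (Python) =====
-- def montando_placar(nomes):
--     nomes = nomes.split()
--     nomes = nomes[0] + nomes[2]
--
--     cnt = {}
--     for letra in nomes:
--         cnt[letra] = cnt.get(letra, 0) + 1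
--
--     return 5 * sum(cnt.get(v, 0) for v in 'aeiou') + 15 * sum(cnt.get(v, 0) for v in 'amor')
-- ===== Notes on version B (the rewrite author's own statement) =====
-- stated objective: alternative
-- what changed: Replaces the per-character loop carrying a score with two membership tests by building a character frequency table once and then summing 5 times the counts over the five vowels plus 15 times the counts over the four letters of the target word.
import Mathlib
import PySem

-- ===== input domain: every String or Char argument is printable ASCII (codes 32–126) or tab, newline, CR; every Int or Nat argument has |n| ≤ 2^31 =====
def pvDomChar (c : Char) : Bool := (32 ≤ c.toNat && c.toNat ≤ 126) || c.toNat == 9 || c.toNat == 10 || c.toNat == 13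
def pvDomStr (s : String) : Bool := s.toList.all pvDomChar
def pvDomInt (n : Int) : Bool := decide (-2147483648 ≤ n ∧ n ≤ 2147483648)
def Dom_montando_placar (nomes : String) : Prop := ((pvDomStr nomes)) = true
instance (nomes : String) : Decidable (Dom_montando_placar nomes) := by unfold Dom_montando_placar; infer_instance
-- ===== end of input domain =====

-- B replaces the per-character loop with two membership tests by a character frequency
-- table built once plus sums over the two fixed letter sets; same cost (objective: alternative).

-- ===== PORT A =====
def montando_placar (nomes : String) : Int :=
  let parts := PySem.Str.split₀ nomes
  match PySem.List.pyGet? parts 0, PySem.List.pyGet? parts 2 with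
  | some p0, some p2 =>
    (p0 ++ p2).toList.foldl (fun placar letra =>
      let placar := if PySem.Str.isIn (String.singleton letra) "aeiou" then placar + 5 else placar
      if PySem.Str.isIn (String.singleton letra) "amor" then placar + 15 else placar) 0
  | _, _ => 0  -- unreachable under Pre_ (Python raises IndexError)

-- ===== PORT B =====
def montando_placar_alt (nomes : String) : Int :=
  let parts := PySem.Str.split₀ nomes
  match PySem.List.pyGet? parts 0 with
  | none => 0  -- unreachable under Pre_ (Python raises IndexError)
  | some p0 =>
    match PySem.List.pyGet? parts 2 with
    | none => 0  -- unreachable under Pre_ (Python raises IndexError)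
    | some p2 =>
      let cnt : PySem.Dict Char Int :=
        (p0 ++ p2).toList.foldl (fun d x => d.insert x (d.getD x 0 + 1)) PySem.Dict.empty
      5 * (("aeiou".toList.map (fun v => cnt.getD v 0)).sum) +
      15 * (("amor".toList.map (fun v => cnt.getD v 0)).sum)

-- ===== PRECONDITION & SPEC =====
-- Pre_ excludes exactly the inputs whose whitespace split has fewer than 3 words, on which A raises IndexError.
def Pre_montando_placar (nomes : String) : Prop := 3 ≤ (PySem.Str.split₀ nomes).length
instance (nomes : String) : Decidable (Pre_montando_placar nomes) := by unfold Pre_montando_placar; infer_instance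
def pvWitness_montando_placar : String := "eu te amo"

def Spec_montando_placar (nomes : String) (out : Int) : Prop := out = montando_placar_alt nomes
instance (nomes : String) (out : Int) : Decidable (Spec_montando_placar nomes out) := by unfold Spec_montando_placar; infer_instance

-- ===== CLAIM (what is proved, stated in full; the proofs are below) =====
def Claim_equal_montando_placar : Prop := ∀ (nomes : String), Dom_montando_placar nomes → Pre_montando_placar nomes → Spec_montando_placar nomes (montando_placar nomes)

-- ===== LEMMAS AND PROOFS =====

-- single-character Python 'in' test is list membership
lemma isIn_singleton (c : Char) (s : String) :
    PySem.Str.isIn (String.singleton c) s = s.toList.contains c := by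
  simp only [PySem.Str.isIn_eq, String.toList_singleton]
  by_cases hm : c ∈ s.toList
  · simp [(PySem.Chars.isIn_iff_infix _ _).mpr ((List.singleton_infix_iff _ _).mpr hm), hm]
  · have : PySem.Chars.isIn [c] s.toList ≠ true := fun h =>
      hm ((List.singleton_infix_iff _ _).mp ((PySem.Chars.isIn_iff_infix _ _).mp h))
    simp [Bool.eq_false_iff.mpr this, hm]

-- A's loop computes 5·(vowel count) + 15·('amor'-letter count)
lemma loopA (l : List Char) (a : Int) :
    l.foldl (fun placar letra =>
      let placar := if PySem.Str.isIn (String.singleton letra) "aeiou" then placar + 5 else placar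
      if PySem.Str.isIn (String.singleton letra) "amor" then placar + 15 else placar) a
    = a + 5 * (l.countP (fun c => (['a','e','i','o','u'] : List Char).contains c) : Int)
        + 15 * (l.countP (fun c => (['a','m','o','r'] : List Char).contains c) : Int) := by
  induction l generalizing a with
  | nil => simp
  | cons c l ih =>
    rw [List.foldl_cons, ih, List.countP_cons, List.countP_cons]
    push_cast
    simp only [isIn_singleton, show ("aeiou".toList = ['a','e','i','o','u']) from rfl,
               show ("amor".toList = ['a','m','o','r']) from rfl]
    split_ifs <;> ring

lemma countP_vowels (l : List Char) :
    (l.countP (fun c => (['a','e','i','o','u'] : List Char).contains c) : Int)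
      = l.count 'a' + l.count 'e' + l.count 'i' + l.count 'o' + l.count 'u' := by
  induction l with
  | nil => simp
  | cons c l ih =>
    rw [List.countP_cons, List.count_cons, List.count_cons, List.count_cons,
        List.count_cons, List.count_cons]
    push_cast
    rw [ih]
    by_cases h : c ∈ (['a','e','i','o','u'] : List Char)
    · fin_cases h <;> simp <;> omega
    · simp only [List.mem_cons, not_or] at h
      obtain ⟨h1,h2,h3,h4,h5⟩ := h
      rw [if_neg (by simp [h1,h2,h3,h4,h5]), if_neg (by simp [h1]), if_neg (by simp [h2]),
          if_neg (by simp [h3]), if_neg (by simp [h4]), if_neg (by simp [h5])]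
      ring

lemma countP_amor (l : List Char) :
    (l.countP (fun c => (['a','m','o','r'] : List Char).contains c) : Int)
      = l.count 'a' + l.count 'm' + l.count 'o' + l.count 'r' := by
  induction l with
  | nil => simp
  | cons c l ih =>
    rw [List.countP_cons, List.count_cons, List.count_cons, List.count_cons, List.count_cons]
    push_cast
    rw [ih]
    by_cases h : c ∈ (['a','m','o','r'] : List Char)
    · fin_cases h <;> simp <;> omega
    · simp only [List.mem_cons, not_or] at h
      obtain ⟨h1,h2,h3,h4⟩ := h
      rw [if_neg (by simp [h1,h2,h3,h4]), if_neg (by simp [h1]), if_neg (by simp [h2]),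
          if_neg (by simp [h3]), if_neg (by simp [h4])]
      ring

-- ===== VERDICT (by name: the statement is the Claim_ definition above) =====
theorem montando_placar_spec : Claim_equal_montando_placar := by
  intro nomes _ _
  unfold Spec_montando_placar montando_placar montando_placar_alt
  cases h0 : PySem.List.pyGet? (PySem.Str.split₀ nomes) 0 with
  | none => cases h2 : PySem.List.pyGet? (PySem.Str.split₀ nomes) 2 <;> simp [h0, h2]
  | some p0 =>
    cases h2 : PySem.List.pyGet? (PySem.Str.split₀ nomes) 2 with
    | none => simp [h0, h2]
    | some p2 =>
      simp only [h0, h2]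
      rw [loopA, countP_vowels, countP_amor]
      simp only [PySem.Dict.foldl_insert_getD_add_one_eq_counter, PySem.Dict.getD_counter]
      simp [List.map_cons, List.sum_cons]
      ring
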